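-- pv_equiv track=rewrite | github.com/Cellim01/ai-mevzuat | ai-service/scripts/ocr_utils.py | _hits_to_bands
-- ===== SOURCE A (Python) =====
-- def _hits_to_bands(hits: list[bool], min_len: int = 1, merge_gap: int = 2) -> list[tuple[int, int]]:
--     bands: list[list[int]] = []
--     start = None
--     prev = None
--     for i, flag in enumerate(hits):
--         if flag:
--             if start is None:
--                 start = i
--             prev = i
--         elif start is not None and prev is not None:
--             if (prev - start + 1) >= min_len:
--                 bands.append([start, prev])
--             start, prev = None, None
--
--     if start is not None and prev is not None and (prev - start + 1) >= min_len:
--         bands.append([start, prev])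
--
--     if not bands:
--         return []
--
--     merged: list[list[int]] = [bands[0]]
--     for s, e in bands[1:]:
--         if s - merged[-1][1] - 1 <= merge_gap:
--             merged[-1][1] = e
--         else:
--             merged.append([s, e])
--     return [(s, e) for s, e in merged]
-- ===== SOURCE B (Python) =====
-- def _hits_to_bands(hits: list[bool], min_len: int = 1, merge_gap: int = 2) -> list[tuple[int, int]]:
--     # Run-length encode the boolean list, then derive bands from the runs.
--     runs: list[list] = []
--     for f in hits:
--         if runs and runs[-1][0] == f:
--             runs[-1][1] += 1
--         else:
--             runs.append([f, 1])
--     starts: list[int] = []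
--     acc = 0
--     for _, n in runs:
--         starts.append(acc)
--         acc += n
--     bands = [(s, s + n - 1) for (f, n), s in zip(runs, starts) if f and n >= min_len]
--     out: list[tuple[int, int]] = []
--     for s, e in bands:
--         if out and s - out[-1][1] - 1 <= merge_gap:
--             out[-1] = (out[-1][0], e)
--         else:
--             out.append((s, e))
--     return out
-- ===== Notes on version B (the rewrite author's own statement) =====
-- stated objective: alternative
-- what changed: Replaces A's start/prev optional-state machine with a run-length encoding of the boolean list plus prefix-sum start indices and a filtering comprehension to obtain the bands, keeping the final merge pass as a simple fold.
import Mathlib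
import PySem

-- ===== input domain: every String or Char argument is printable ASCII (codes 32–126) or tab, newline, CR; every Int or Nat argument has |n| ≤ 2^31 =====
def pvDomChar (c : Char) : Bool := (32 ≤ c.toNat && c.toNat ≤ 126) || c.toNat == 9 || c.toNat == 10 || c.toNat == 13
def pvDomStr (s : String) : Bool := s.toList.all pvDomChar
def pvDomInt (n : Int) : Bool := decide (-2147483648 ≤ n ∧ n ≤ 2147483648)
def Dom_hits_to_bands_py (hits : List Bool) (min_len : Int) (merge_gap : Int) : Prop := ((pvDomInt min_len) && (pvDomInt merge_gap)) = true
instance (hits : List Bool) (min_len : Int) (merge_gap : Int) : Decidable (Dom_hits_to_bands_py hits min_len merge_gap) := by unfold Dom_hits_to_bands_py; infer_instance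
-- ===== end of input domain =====

-- B replaces A's start/prev state machine by run-length encoding + prefix-sum starts; same O(n) cost ("alternative").

-- ===== PORT A =====
-- the enumerate loop of A, carrying index i and state (bands, start, prev)
-- one iteration of A's enumerate loop body
def stepA (min_len : Int) (flag : Bool) (i : Int)
    (st : List (Int × Int) × Option Int × Option Int) :
    (List (Int × Int) × Option Int × Option Int) :=
  if flag then
    (st.1, (match st.2.1 with | none => some i | some s => some s), some i)
  else
    match st.2.1, st.2.2 with
    | some s, some p =>
        ((if p - s + 1 ≥ min_len then st.1 ++ [(s, p)] else st.1), none, none)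
    | none, pr => (st.1, none, pr)
    | some s, none => (st.1, some s, none)

def loopA (min_len : Int) : List Bool → Int → List (Int × Int) → Option Int → Option Int →
    (List (Int × Int) × Option Int × Option Int)
  | [], _, bands, start, prev => (bands, start, prev)
  | flag :: t, i, bands, start, prev =>
    let st := stepA min_len flag i (bands, start, prev)
    loopA min_len t (i + 1) st.1 st.2.1 st.2.2

-- merged[-1][1] = e  /  merged.append([s, e])
def mergeStepA (merge_gap : Int) (merged : List (Int × Int)) (b : Int × Int) : List (Int × Int) :=
  match merged.getLast? with
  | some (ps, pe) =>
      if b.1 - pe - 1 ≤ merge_gap then merged.dropLast ++ [(ps, b.2)] else merged ++ [b]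
  | none => merged ++ [b]

def hits_to_bands_py (hits : List Bool) (min_len : Int) (merge_gap : Int) : List (Int × Int) :=
  let st := loopA min_len hits 0 [] none none
  let bands :=
    match st.2.1, st.2.2 with
    | some s, some p => if p - s + 1 ≥ min_len then st.1 ++ [(s, p)] else st.1
    | _, _ => st.1
  match bands with
  | [] => []
  | b0 :: rest => rest.foldl (mergeStepA merge_gap) [b0]

-- ===== PORT B =====
-- runs[-1][1] += 1  /  runs.append([f, 1])
def rleStep (runs : List (Bool × Int)) (f : Bool) : List (Bool × Int) :=
  match runs.getLast? with
  | some (g, n) => if g == f then runs.dropLast ++ [(g, n + 1)] else runs ++ [(f, 1)]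
  | none => [(f, 1)]

-- starts.append(acc); acc += n
def startStep (st : List Int × Int) (r : Bool × Int) : List Int × Int :=
  (st.1 ++ [st.2], st.2 + r.2)

-- out[-1] = (out[-1][0], e)  /  out.append((s, e))
def mergeStepB (merge_gap : Int) (out : List (Int × Int)) (b : Int × Int) : List (Int × Int) :=
  match out.getLast? with
  | some (ps, pe) =>
      if b.1 - pe - 1 ≤ merge_gap then out.dropLast ++ [(ps, b.2)] else out ++ [b]
  | none => [b]

def hits_to_bands_py_alt (hits : List Bool) (min_len : Int) (merge_gap : Int) : List (Int × Int) :=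
  let runs := hits.foldl rleStep []
  let starts := (runs.foldl startStep ([], 0)).1
  let bands := (runs.zip starts).filterMap
    (fun p => if p.1.1 ∧ p.1.2 ≥ min_len then some (p.2, p.2 + p.1.2 - 1) else none)
  bands.foldl (mergeStepB merge_gap) []

-- ===== PRECONDITION & SPEC =====
def Spec_hits_to_bands_py (hits : List Bool) (min_len : Int) (merge_gap : Int) (out : List (Int × Int)) : Prop := out = hits_to_bands_py_alt hits min_len merge_gap
instance (hits : List Bool) (min_len : Int) (merge_gap : Int) (out : List (Int × Int)) : Decidable (Spec_hits_to_bands_py hits min_len merge_gap out) := by unfold Spec_hits_to_bands_py; infer_instance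

-- ===== CLAIM (what is proved, stated in full; the proofs are below) =====
def Claim_equal_hits_to_bands_py : Prop := ∀ (hits : List Bool) (min_len : Int) (merge_gap : Int), Dom_hits_to_bands_py hits min_len merge_gap → Spec_hits_to_bands_py hits min_len merge_gap (hits_to_bands_py hits min_len merge_gap)

-- ===== LEMMAS AND PROOFS =====

-- reference band computation, consuming one run at a time
mutual
def bandsRec (ml : Int) : Int → List Bool → List (Int × Int)
  | _, [] => []
  | i, false :: t => bandsRec ml (i + 1) t
  | i, true :: t => bandsIn ml i (i + 1) t
def bandsIn (ml : Int) (s : Int) : Int → List Bool → List (Int × Int)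
  | i, [] => if i - s ≥ ml then [(s, i - 1)] else []
  | i, true :: t => bandsIn ml s (i + 1) t
  | i, false :: t => (if i - s ≥ ml then [(s, i - 1)] else []) ++ bandsRec ml (i + 1) t
end

-- reference run-length encoding, consuming one element at a time
def run1 (g : Bool) (n : Int) : List Bool → List (Bool × Int)
  | [] => [(g, n)]
  | f :: t => if f = g then run1 g (n + 1) t else (g, n) :: run1 f 1 t

def runsOf : List Bool → List (Bool × Int)
  | [] => []
  | f :: t => run1 f 1 t

def startsFrom (i : Int) : List (Bool × Int) → List Int
  | [] => []
  | r :: rs => i :: startsFrom (i + r.2) rs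

def pipe (ml : Int) (i : Int) (rs : List (Bool × Int)) : List (Int × Int) :=
  (rs.zip (startsFrom i rs)).filterMap
    (fun p => if p.1.1 ∧ p.1.2 ≥ ml then some (p.2, p.2 + p.1.2 - 1) else none)

-- A-side characterisation ------------------------------------------------

def finA (ml : Int) (st : List (Int × Int) × Option Int × Option Int) : List (Int × Int) :=
  match st.2.1, st.2.2 with
  | some s, some p => if p - s + 1 ≥ ml then st.1 ++ [(s, p)] else st.1
  | _, _ => st.1

theorem loopA_char (ml : Int) (l : List Bool) : ∀ (i : Int) (bands : List (Int × Int)),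
    finA ml (loopA ml l i bands none none) = bands ++ bandsRec ml i l ∧
    (∀ s, finA ml (loopA ml l i bands (some s) (some (i - 1))) = bands ++ bandsIn ml s i l) := by
  induction l with
  | nil =>
    intro i bands
    refine ⟨by simp [loopA, finA, bandsRec], ?_⟩
    intro s
    simp only [loopA, finA, bandsIn]
    rw [show i - 1 - s + 1 = i - s from by ring]
    split_ifs <;> simp
  | cons f t ih =>
    intro i bands
    constructor
    · cases f
      · simpa [loopA, stepA, bandsRec] using (ih (i + 1) bands).1
      · have h := (ih (i + 1) bands).2 i
        simp only [loopA, stepA, bandsRec]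
        simpa using h
    · intro s
      cases f
      · simp only [loopA, stepA, if_neg (by decide : ¬ (false = true)), bandsIn]
        rw [show i - 1 - s + 1 = i - s from by ring]
        have h := (ih (i + 1) (if i - s ≥ ml then bands ++ [(s, i - 1)] else bands)).1
        simpa only [h] using (by split_ifs <;> simp :
          (if i - s ≥ ml then bands ++ [(s, i - 1)] else bands) ++ bandsRec ml (i + 1) t =
            bands ++ ((if i - s ≥ ml then [(s, i - 1)] else []) ++ bandsRec ml (i + 1) t))
      · have h := (ih (i + 1) bands).2 s
        simp only [loopA, stepA, bandsIn]
        simpa using h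

-- B-side: the RLE fold ---------------------------------------------------

theorem rle_shift (l : List Bool) : ∀ (rs : List (Bool × Int)) (g : Bool) (n : Int),
    List.foldl rleStep (rs ++ [(g, n)]) l = rs ++ List.foldl rleStep [(g, n)] l := by
  induction l with
  | nil => intro rs g n; simp
  | cons f t ih =>
    intro rs g n
    have hstep : rleStep (rs ++ [(g, n)]) f =
        if g == f then rs ++ [(g, n + 1)] else (rs ++ [(g, n)]) ++ [(f, 1)] := by
      simp only [rleStep, List.getLast?_concat, List.dropLast_concat]
    have hstep1 : rleStep [(g, n)] f =
        if g == f then [(g, n + 1)] else [(g, n), (f, 1)] := by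
      simp only [rleStep, List.getLast?_singleton, List.dropLast_singleton]
      split_ifs <;> rfl
    simp only [List.foldl_cons, hstep, hstep1]
    by_cases h : (g == f) = true
    · simp only [h, if_true]
      rw [ih rs g (n + 1)]
    · simp only [h, if_false, Bool.false_eq_true]
      rw [show rs ++ [(g, n)] ++ [(f, (1 : Int))] = (rs ++ [(g, n)]) ++ [(f, (1 : Int))] from rfl,
        ih (rs ++ [(g, n)]) f 1,
        show ([(g, n), (f, (1 : Int))] : List (Bool × Int)) = [(g, n)] ++ [(f, 1)] from rfl,
        ih [(g, n)] f 1]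
      simp

theorem rle_run1 (l : List Bool) : ∀ (g : Bool) (n : Int),
    List.foldl rleStep [(g, n)] l = run1 g n l := by
  induction l with
  | nil => intro g n; simp [run1]
  | cons f t ih =>
    intro g n
    have hstep1 : rleStep [(g, n)] f =
        if g == f then [(g, n + 1)] else [(g, n), (f, 1)] := by
      simp only [rleStep, List.getLast?_singleton, List.dropLast_singleton]
      split_ifs <;> rfl
    simp only [List.foldl_cons, hstep1, run1]
    by_cases h : f = g
    · subst h; simp only [beq_self_eq_true, if_true]
      exact ih f (n + 1)
    · simp only [show (g == f) = false from by simp [Ne.symm h], if_false,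
        if_neg h, Bool.false_eq_true]
      rw [show ([(g, n), (f, (1 : Int))] : List (Bool × Int)) = [(g, n)] ++ [(f, 1)] from rfl,
        rle_shift, ih f 1]
      simp

theorem rle_runsOf (l : List Bool) : List.foldl rleStep [] l = runsOf l := by
  cases l with
  | nil => simp [runsOf]
  | cons f t =>
    simp only [List.foldl_cons, rleStep, List.getLast?_nil, runsOf]
    exact rle_run1 t f 1

-- B-side: the starts fold ------------------------------------------------

def runTotal : List (Bool × Int) → Int
  | [] => 0
  | r :: rs => r.2 + runTotal rs

theorem starts_char (rs : List (Bool × Int)) : ∀ (acc : List Int) (i : Int),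
    List.foldl startStep (acc, i) rs = (acc ++ startsFrom i rs, i + runTotal rs) := by
  induction rs with
  | nil => intro acc i; simp [startsFrom, runTotal]
  | cons r t ih =>
    intro acc i
    simp only [List.foldl_cons, startStep, startsFrom, runTotal]
    rw [ih]
    refine Prod.ext (by simp) ?_
    simp only []
    ring

-- pipe distributes over a leading run
theorem pipe_cons (ml i : Int) (r : Bool × Int) (rs : List (Bool × Int)) :
    pipe ml i (r :: rs) =
      (if r.1 ∧ r.2 ≥ ml then [(i, i + r.2 - 1)] else []) ++ pipe ml (i + r.2) rs := by
  simp only [pipe, startsFrom, List.zip_cons_cons, List.filterMap_cons]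
  split_ifs <;> simp

theorem pipe_run1 (ml : Int) (l : List Bool) : ∀ (s n i : Int),
    (pipe ml s (run1 true n l) = bandsIn ml s (s + n) l) ∧
    (pipe ml i (run1 false n l) = bandsRec ml (i + n) l) := by
  induction l with
  | nil =>
    intro s n i
    refine ⟨?_, ?_⟩
    · rw [show run1 true n [] = [(true, n)] from rfl, pipe_cons]
      rw [show bandsIn ml s (s + n) [] = if s + n - s ≥ ml then [(s, s + n - 1)] else [] from rfl]
      rw [show s + n - s = n from by ring]
      simp [pipe, startsFrom]
    · rw [show run1 false n [] = [(false, n)] from rfl, pipe_cons]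
      simp [pipe, startsFrom, bandsRec]
  | cons f t ih =>
    intro s n i
    refine ⟨?_, ?_⟩
    · cases f
      · rw [show run1 true n (false :: t) = (true, n) :: run1 false 1 t from by simp [run1],
          pipe_cons, (ih (s + n) 1 (s + n)).2]
        rw [show bandsIn ml s (s + n) (false :: t) =
          (if s + n - s ≥ ml then [(s, s + n - 1)] else []) ++ bandsRec ml (s + n + 1) t from rfl]
        rw [show s + n - s = n from by ring]
        simp
      · rw [show run1 true n (true :: t) = run1 true (n + 1) t from by simp [run1],
          (ih s (n + 1) i).1]
        rw [show s + (n + 1) = s + n + 1 from by ring]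
        rfl
    · cases f
      · rw [show run1 false n (false :: t) = run1 false (n + 1) t from by simp [run1],
          (ih s (n + 1) i).2]
        rw [show i + (n + 1) = i + n + 1 from by ring]
        rfl
      · rw [show run1 false n (true :: t) = (false, n) :: run1 true 1 t from by simp [run1],
          pipe_cons, (ih (i + n) 1 i).1]
        simp [bandsRec]

theorem pipe_runsOf (ml : Int) (l : List Bool) : pipe ml 0 (runsOf l) = bandsRec ml 0 l := by
  cases l with
  | nil => simp [runsOf, pipe, bandsRec, startsFrom]
  | cons f t =>
    cases f
    · have := (pipe_run1 ml t 0 1 0).2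
      simpa [runsOf, bandsRec] using this
    · have := (pipe_run1 ml t 0 1 0).1
      simpa [runsOf, bandsRec] using this

-- merge folds agree ------------------------------------------------------

theorem mergeStep_eq (mg : Int) : mergeStepA mg = mergeStepB mg := by
  funext merged b
  simp only [mergeStepA, mergeStepB]
  cases h : merged.getLast? with
  | none => rw [List.getLast?_eq_none_iff.mp h]; rfl
  | some p => rfl

theorem merge_eq (mg : Int) (bands : List (Int × Int)) :
    (match bands with
      | [] => ([] : List (Int × Int))
      | b0 :: rest => rest.foldl (mergeStepA mg) [b0]) =
    bands.foldl (mergeStepB mg) [] := by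
  cases bands with
  | nil => rfl
  | cons b0 rest => rw [mergeStep_eq]; rfl

-- ===== VERDICT (by name: the statement is the Claim_ definition above) =====
theorem hits_to_bands_py_spec : Claim_equal_hits_to_bands_py := by
  intro hits ml mg _
  show hits_to_bands_py hits ml mg = hits_to_bands_py_alt hits ml mg
  have hA : hits_to_bands_py hits ml mg =
      match finA ml (loopA ml hits 0 [] none none) with
      | [] => ([] : List (Int × Int))
      | b0 :: rest => rest.foldl (mergeStepA mg) [b0] := rfl
  have hB : hits_to_bands_py_alt hits ml mg = (bandsRec ml 0 hits).foldl (mergeStepB mg) [] := by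
    simp only [hits_to_bands_py_alt]
    rw [rle_runsOf,
      show ((runsOf hits).foldl startStep ([], 0)).1 = startsFrom 0 (runsOf hits) from by
        rw [starts_char]; simp]
    show (pipe ml 0 (runsOf hits)).foldl (mergeStepB mg) [] = _
    rw [pipe_runsOf]
  have hbands : finA ml (loopA ml hits 0 [] none none) = bandsRec ml 0 hits := by
    simpa using (loopA_char ml hits 0 []).1
  rw [hA, hB, hbands]
  exact merge_eq mg (bandsRec ml 0 hits)
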